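-- pv_equiv track=rewrite | github.com/KaiHabermann/ThresholdFinder | threshold_finder/flavor.py | parse_quark_content
-- ===== SOURCE A (Python) =====
-- from typing import Optional
--
-- def parse_quark_content(quarks_str: str) -> Optional[dict[str, int]]:
--     """Parse the PDG quarks string into net quark numbers.
--
--     Lowercase letter = quark (+1), uppercase = antiquark (-1).
--     Returns None for superposition / mixed states (e.g. '(uU-dD)/sqrt(2)').
--     """
--     s = quarks_str.strip()
--     if any(ch in s for ch in ("(", "/", "+", "-", "x", "y")):
--         return None
--     counts: dict[str, int] = {}
--     for ch in s:
--         if ch.isalpha():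
--             flavor = ch.lower()
--             counts[flavor] = counts.get(flavor, 0) + (1 if ch.islower() else -1)
--     return counts
-- ===== SOURCE B (Python) =====
-- from typing import Optional
--
-- def parse_quark_content(quarks_str: str) -> Optional[dict[str, int]]:
--     """Same guard as A; then per-flavor counting: collect the distinct
--     flavors (lowered alpha chars, first-occurrence order) and compute each
--     net number with two s.count scans instead of one accumulating dict pass."""
--     s = quarks_str.strip()
--     if any(ch in s for ch in ("(", "/", "+", "-", "x", "y")):
--         return None
--     flavors = dict.fromkeys(ch.lower() for ch in s if ch.isalpha())
--     return {f: s.count(f) - s.count(f.upper()) for f in flavors}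
-- ===== Notes on version B (the rewrite author's own statement) =====
-- stated objective: alternative
-- what changed: A builds the dict in one accumulating pass with counts.get(...)+/-1 per character; B first collects the distinct lowered flavors (dict.fromkeys over the alpha chars) and then computes each net number as s.count(f) - s.count(f.upper()), i.e. per-flavor rescans instead of one stateful pass.
import Mathlib
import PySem

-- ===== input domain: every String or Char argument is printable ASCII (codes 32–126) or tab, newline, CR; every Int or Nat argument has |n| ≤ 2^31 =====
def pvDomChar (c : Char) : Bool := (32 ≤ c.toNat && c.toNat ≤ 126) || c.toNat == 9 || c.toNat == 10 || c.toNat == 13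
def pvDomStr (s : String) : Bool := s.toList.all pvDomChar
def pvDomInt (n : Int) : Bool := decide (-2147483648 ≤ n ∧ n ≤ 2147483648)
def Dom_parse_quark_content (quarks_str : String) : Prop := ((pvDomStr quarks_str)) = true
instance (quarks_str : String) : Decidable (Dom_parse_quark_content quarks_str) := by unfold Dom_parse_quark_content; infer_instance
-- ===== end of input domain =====

-- B replaces A's single accumulating dict pass with per-flavor counting (distinct lowered
-- flavors in first-occurrence order, net = s.count(f) - s.count(F)); objective: alternative.

-- ===== PORT A =====
def parse_quark_content (quarks_str : String) : Option (List (String × Int)) :=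
  let s := PySem.Str.strip quarks_str
  if ["(", "/", "+", "-", "x", "y"].any (fun ch => PySem.Str.isIn ch s) then
    none
  else
    let counts := s.toList.foldl (fun (d : PySem.Dict String Int) ch =>
      if PySem.Chars.isalpha ch then
        d.insert (String.ofList [PySem.Chars.lowerChar ch])
          (d.getD (String.ofList [PySem.Chars.lowerChar ch]) 0
            + (if PySem.Chars.islower ch then (1 : Int) else -1))
      else d) PySem.Dict.empty
    some counts.items

-- ===== PORT B =====
def parse_quark_content_alt (quarks_str : String) : Option (List (String × Int)) :=
  let s := PySem.Str.strip quarks_str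
  if ["(", "/", "+", "-", "x", "y"].any (fun ch => PySem.Str.isIn ch s) then
    none
  else
    let flavors := PySem.List.dedup
      ((s.toList.filter (fun c => PySem.Chars.isalpha c)).map PySem.Chars.lowerChar)
    some (flavors.map (fun f =>
      (String.ofList [f],
        (PySem.Str.count s (String.ofList [f]) : Int)
          - (PySem.Str.count s (String.ofList [PySem.Chars.upperChar f]) : Int))))

-- ===== PRECONDITION & SPEC =====
def Spec_parse_quark_content (quarks_str : String) (out : Option (List (String × Int))) : Prop := out = parse_quark_content_alt quarks_str
instance (quarks_str : String) (out : Option (List (String × Int))) : Decidable (Spec_parse_quark_content quarks_str out) := by unfold Spec_parse_quark_content; infer_instance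

-- ===== CLAIM (what is proved, stated in full; the proofs are below) =====
def Claim_equal_parse_quark_content : Prop := ∀ (quarks_str : String), Dom_parse_quark_content quarks_str → Spec_parse_quark_content quarks_str (parse_quark_content quarks_str)

-- ===== LEMMAS AND PROOFS =====

-- Char-level facts about PySem's case machinery (they hold for ALL Char by its definitions).
theorem pv_char_le (a b : Char) : (a ≤ b) ↔ a.toNat ≤ b.toNat := by
  rw [Char.le_def]; exact UInt32.le_iff_toNat_le

theorem pv_char_eq (a b : Char) : a = b ↔ a.toNat = b.toNat :=
  ⟨congrArg _, fun h => Char.ext (UInt32.toNat_inj.mp h)⟩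

theorem pv_islower_toNat (f : Char) :
    PySem.Chars.islower f = true ↔ (97 ≤ f.toNat ∧ f.toNat ≤ 122) := by
  simp [PySem.Chars.islower, pv_char_le]

theorem pv_isupper_toNat (c : Char) :
    PySem.Chars.isupper c = true ↔ (65 ≤ c.toNat ∧ c.toNat ≤ 90) := by
  simp [PySem.Chars.isupper, pv_char_le]

theorem pv_toNat_upperChar (f : Char) (h : PySem.Chars.islower f = true) :
    (PySem.Chars.upperChar f).toNat = f.toNat - 32 := by
  rw [pv_islower_toNat] at h
  rw [PySem.Chars.upperChar, if_pos ((pv_islower_toNat f).mpr h)]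
  rw [Char.toNat_ofNat, if_pos (Or.inl (by omega))]

theorem pv_toNat_lowerChar (c : Char) (h : PySem.Chars.isupper c = true) :
    (PySem.Chars.lowerChar c).toNat = c.toNat + 32 := by
  rw [pv_isupper_toNat] at h
  rw [PySem.Chars.lowerChar, if_pos ((pv_isupper_toNat c).mpr h)]
  rw [Char.toNat_ofNat, if_pos (Or.inl (by omega))]

theorem pv_lowerChar_of_lower (f : Char) (h : PySem.Chars.islower f = true) :
    PySem.Chars.lowerChar f = f := by
  rw [pv_islower_toNat] at h
  rw [PySem.Chars.lowerChar, if_neg]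
  rw [pv_isupper_toNat]; omega

theorem pv_islower_lowerChar (c : Char) (h : PySem.Chars.isalpha c = true) :
    PySem.Chars.islower (PySem.Chars.lowerChar c) = true := by
  rw [PySem.Chars.isalpha, Bool.or_eq_true] at h
  rcases h with h | h
  · rw [pv_islower_toNat, pv_toNat_lowerChar c h]
    rw [pv_isupper_toNat] at h; omega
  · rw [pv_lowerChar_of_lower c h]; exact h

theorem pv_isupper_upperChar (f : Char) (h : PySem.Chars.islower f = true) :
    PySem.Chars.isupper (PySem.Chars.upperChar f) = true := by
  rw [pv_isupper_toNat, pv_toNat_upperChar f h]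
  rw [pv_islower_toNat] at h; omega

theorem pv_lowerChar_upperChar (f : Char) (h : PySem.Chars.islower f = true) :
    PySem.Chars.lowerChar (PySem.Chars.upperChar f) = f := by
  rw [pv_char_eq, pv_toNat_lowerChar _ (pv_isupper_upperChar f h), pv_toNat_upperChar f h]
  rw [pv_islower_toNat] at h; omega

theorem pv_upperChar_lowerChar (c : Char) (hc : PySem.Chars.isupper c = true) :
    PySem.Chars.upperChar (PySem.Chars.lowerChar c) = c := by
  have hl : PySem.Chars.islower (PySem.Chars.lowerChar c) = true := by
    rw [pv_islower_toNat, pv_toNat_lowerChar c hc]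
    rw [pv_isupper_toNat] at hc; omega
  rw [pv_char_eq, pv_toNat_upperChar _ hl, pv_toNat_lowerChar c hc]
  rw [pv_isupper_toNat] at hc; omega

theorem pv_lower_ne_upperChar (c f : Char) (hc : PySem.Chars.islower c = true)
    (hf : PySem.Chars.islower f = true) : c ≠ PySem.Chars.upperChar f := by
  intro h
  have h2 := congrArg Char.toNat h
  rw [pv_toNat_upperChar f hf] at h2
  rw [pv_islower_toNat] at hc hf; omega

theorem pv_upper_ne_lower (c f : Char) (hc : PySem.Chars.isupper c = true)
    (hf : PySem.Chars.islower f = true) : c ≠ f := by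
  intro h
  have h2 := congrArg Char.toNat h
  rw [pv_isupper_toNat] at hc; rw [pv_islower_toNat] at hf; omega

theorem pv_isalpha_of_lower (f : Char) (h : PySem.Chars.islower f = true) :
    PySem.Chars.isalpha f = true := by
  rw [PySem.Chars.isalpha, Bool.or_eq_true]; exact Or.inr h

theorem pv_isalpha_of_upper (c : Char) (h : PySem.Chars.isupper c = true) :
    PySem.Chars.isalpha c = true := by
  rw [PySem.Chars.isalpha, Bool.or_eq_true]; exact Or.inl h

theorem pv_lower_eq_iff (c f : Char) (hc : PySem.Chars.isalpha c = true)
    (hf : PySem.Chars.islower f = true) :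
    PySem.Chars.lowerChar c = f ↔ (c = f ∨ c = PySem.Chars.upperChar f) := by
  have hup := pv_toNat_upperChar f hf
  rw [PySem.Chars.isalpha, Bool.or_eq_true] at hc
  rw [pv_char_eq (PySem.Chars.lowerChar c) f, pv_char_eq c f,
    pv_char_eq c (PySem.Chars.upperChar f), hup]
  rcases hc with hc | hc
  · rw [pv_toNat_lowerChar c hc]
    rw [pv_isupper_toNat] at hc; rw [pv_islower_toNat] at hf; omega
  · rw [pv_lowerChar_of_lower c hc]
    rw [pv_islower_toNat] at hc hf; omega

theorem pv_ne_of_ne_lower (c f : Char) (hc : PySem.Chars.isalpha c = true)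
    (hf : PySem.Chars.islower f = true) (h : PySem.Chars.lowerChar c ≠ f) :
    c ≠ f ∧ c ≠ PySem.Chars.upperChar f :=
  ⟨fun e => h ((pv_lower_eq_iff c f hc hf).mpr (Or.inl e)),
   fun e => h ((pv_lower_eq_iff c f hc hf).mpr (Or.inr e))⟩

-- Chars.count with a single-character needle is List.count.
theorem pv_count_go_singleton (f : Char) (l : List Char) (fuel acc : Nat)
    (h : l.length ≤ fuel) :
    PySem.Chars.count.go [f] fuel l acc = acc + l.count f := by
  induction l generalizing fuel acc with
  | nil => cases fuel <;> simp [PySem.Chars.count.go]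
  | cons x t ih =>
      cases fuel with
      | zero => simp at h
      | succ n =>
        simp only [List.length] at h
        simp only [PySem.Chars.count.go]
        by_cases hx : f = x
        · subst hx
          simp [List.isPrefixOf, ih n (acc + 1) (by omega)]
          omega
        · simp [List.isPrefixOf, hx, ih n acc (by omega), Ne.symm hx]

theorem pv_count_singleton (f : Char) (l : List Char) :
    PySem.Chars.count l [f] = l.count f := by
  rw [PySem.Chars.count]
  simp [pv_count_go_singleton f l l.length 0 le_rfl]

-- single-char strings
theorem pv_mkS_inj (a b : Char) : String.ofList [a] = String.ofList [b] ↔ a = b := by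
  constructor
  · intro h; have := congrArg String.toList h; simpa using this
  · intro h; rw [h]

theorem pv_mkS_beq (a b : Char) :
    ((String.ofList [a] == String.ofList [b]) = true) ↔ a = b := by
  constructor
  · intro h; exact (pv_mkS_inj a b).mp (eq_of_beq h)
  · intro h; rw [h]; simp

-- proof-side abbreviations
def pvKeyset (cs : List Char) : List Char :=
  PySem.List.dedup ((cs.filter (fun c => PySem.Chars.isalpha c)).map PySem.Chars.lowerChar)

def pvNet (cs : List Char) (f : Char) : Int :=
  (cs.count f : Int) - (cs.count (PySem.Chars.upperChar f) : Int)

def pvStepA (d : PySem.Dict String Int) (ch : Char) : PySem.Dict String Int :=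
  if PySem.Chars.isalpha ch then
    d.insert (String.ofList [PySem.Chars.lowerChar ch])
      (d.getD (String.ofList [PySem.Chars.lowerChar ch]) 0
        + (if PySem.Chars.islower ch then (1 : Int) else -1))
  else d

theorem pv_mem_keyset_iff (cs : List Char) (f : Char) :
    f ∈ pvKeyset cs ↔ ∃ c, c ∈ cs ∧ PySem.Chars.isalpha c = true ∧ PySem.Chars.lowerChar c = f := by
  unfold pvKeyset
  rw [PySem.List.mem_dedup]
  constructor
  · intro h
    obtain ⟨c, hc, he⟩ := List.mem_map.mp h
    exact ⟨c, (List.mem_filter.mp hc).1, (List.mem_filter.mp hc).2, he⟩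
  · rintro ⟨c, h1, h2, h3⟩
    exact List.mem_map.mpr ⟨c, List.mem_filter.mpr ⟨h1, h2⟩, h3⟩

theorem pv_mem_keyset_lower (cs : List Char) (f : Char) (h : f ∈ pvKeyset cs) :
    PySem.Chars.islower f = true := by
  obtain ⟨c, _, hc, he⟩ := (pv_mem_keyset_iff cs f).mp h
  rw [← he]; exact pv_islower_lowerChar c hc

theorem pv_nodup_keyset (cs : List Char) : (pvKeyset cs).Nodup :=
  PySem.List.nodup_dedup _

theorem pv_net_append_ne (cs : List Char) (c f : Char) (h1 : c ≠ f)
    (h2 : c ≠ PySem.Chars.upperChar f) : pvNet (cs ++ [c]) f = pvNet cs f := by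
  have e1 : List.count f [c] = 0 :=
    List.count_eq_zero.mpr (fun hm => h1 (List.mem_singleton.mp hm).symm)
  have e2 : List.count (PySem.Chars.upperChar f) [c] = 0 :=
    List.count_eq_zero.mpr (fun hm => h2 (List.mem_singleton.mp hm).symm)
  unfold pvNet
  rw [List.count_append, List.count_append, e1, e2]
  push_cast; ring

theorem pv_net_append_self (cs : List Char) (c : Char)
    (hc : PySem.Chars.isalpha c = true) :
    pvNet (cs ++ [c]) (PySem.Chars.lowerChar c)
      = pvNet cs (PySem.Chars.lowerChar c)
        + (if PySem.Chars.islower c then (1 : Int) else -1) := by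
  have hl0 := pv_islower_lowerChar c hc
  by_cases hlc : PySem.Chars.islower c = true
  · have hcf : PySem.Chars.lowerChar c = c := pv_lowerChar_of_lower c hlc
    have hne : PySem.Chars.upperChar (PySem.Chars.lowerChar c) ≠ c :=
      fun e => pv_lower_ne_upperChar c (PySem.Chars.lowerChar c) hlc hl0 e.symm
    have e1 : List.count (PySem.Chars.lowerChar c) [c] = 1 := by rw [hcf]; simp
    have e2 : List.count (PySem.Chars.upperChar (PySem.Chars.lowerChar c)) [c] = 0 :=
      List.count_eq_zero.mpr (fun hm => hne (List.mem_singleton.mp hm))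
    unfold pvNet
    rw [List.count_append, List.count_append, e1, e2]
    simp only [hlc, if_true]
    push_cast; ring
  · have hup : PySem.Chars.isupper c = true := by
      rw [PySem.Chars.isalpha, Bool.or_eq_true] at hc
      rcases hc with h | h
      · exact h
      · exact absurd h hlc
    have hcu : PySem.Chars.upperChar (PySem.Chars.lowerChar c) = c :=
      pv_upperChar_lowerChar c hup
    have hne : PySem.Chars.lowerChar c ≠ c :=
      fun e => pv_upper_ne_lower c (PySem.Chars.lowerChar c) hup hl0 e.symm
    have e1 : List.count (PySem.Chars.lowerChar c) [c] = 0 :=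
      List.count_eq_zero.mpr (fun hm => hne (List.mem_singleton.mp hm))
    have e2 : List.count (PySem.Chars.upperChar (PySem.Chars.lowerChar c)) [c] = 1 := by
      rw [hcu]; simp
    unfold pvNet
    rw [List.count_append, List.count_append, e1, e2]
    simp only [hlc]
    push_cast; ring

theorem pv_net_zero (cs : List Char) (f : Char) (hf : PySem.Chars.islower f = true)
    (h : f ∉ pvKeyset cs) : pvNet cs f = 0 := by
  have h1 : cs.count f = 0 := List.count_eq_zero.mpr (fun hmem =>
    h ((pv_mem_keyset_iff cs f).mpr
      ⟨f, hmem, pv_isalpha_of_lower f hf, pv_lowerChar_of_lower f hf⟩))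
  have h2 : cs.count (PySem.Chars.upperChar f) = 0 := List.count_eq_zero.mpr (fun hmem =>
    h ((pv_mem_keyset_iff cs f).mpr
      ⟨PySem.Chars.upperChar f, hmem,
        pv_isalpha_of_upper _ (pv_isupper_upperChar f hf), pv_lowerChar_upperChar f hf⟩))
  unfold pvNet; rw [h1, h2]; rfl

-- dict-shaped association lists over distinct single-char keys
theorem pv_get?_map (l : List Char) (v : Char → Int) (f0 : Char)
    (hnd : l.Nodup) (h : f0 ∈ l) :
    (PySem.Dict.mk (l.map (fun f => (String.ofList [f], v f)))).get? (String.ofList [f0])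
      = some (v f0) := by
  induction l with
  | nil => simp at h
  | cons a t ih =>
      rw [List.map_cons, PySem.Dict.get?_mk_cons]
      rcases List.mem_cons.mp h with he | ht
      · subst he; rw [if_pos (by simp)]
      · rw [if_neg]
        · exact ih (List.nodup_cons.mp hnd).2 ht
        · intro hbeq
          exact (List.nodup_cons.mp hnd).1 ((pv_mkS_beq a f0).mp hbeq ▸ ht)

theorem pv_contains_map (l : List Char) (v : Char → Int) (f0 : Char) :
    ((PySem.Dict.mk (l.map (fun f => (String.ofList [f], v f)))).contains
      (String.ofList [f0]) = true) ↔ f0 ∈ l := by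
  rw [PySem.Dict.contains_iff_mem_keys]
  simp only [PySem.Dict.keys, List.map_map]
  constructor
  · intro h
    obtain ⟨c, hc, he⟩ := List.mem_map.mp h
    exact (pv_mkS_inj c f0).mp he ▸ hc
  · intro h
    exact List.mem_map.mpr ⟨f0, h, rfl⟩

theorem pv_keyset_append_nonalpha (cs : List Char) (c : Char)
    (hc : ¬ PySem.Chars.isalpha c = true) : pvKeyset (cs ++ [c]) = pvKeyset cs := by
  unfold pvKeyset
  rw [List.filter_append]
  simp [hc]

theorem pv_keyset_append_alpha (cs : List Char) (c : Char)
    (hc : PySem.Chars.isalpha c = true) :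
    pvKeyset (cs ++ [c]) = PySem.Set.add (pvKeyset cs) (PySem.Chars.lowerChar c) := by
  unfold pvKeyset PySem.List.dedup
  rw [List.filter_append, show List.filter (fun c => PySem.Chars.isalpha c) [c] = [c] by simp [hc],
    List.map_append, List.map_cons, List.map_nil, PySem.Set.ofList_append_singleton]

-- the main invariant, by induction from the right
theorem pv_main (cs : List Char) :
    (cs.foldl pvStepA PySem.Dict.empty).items
      = (pvKeyset cs).map (fun f => (String.ofList [f], pvNet cs f)) := by
  induction cs using List.reverseRecOn with
  | nil => rfl
  | append_singleton cs c ih =>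
      have hd : cs.foldl pvStepA PySem.Dict.empty
          = PySem.Dict.mk ((pvKeyset cs).map (fun f => (String.ofList [f], pvNet cs f))) :=
        PySem.Dict.ext ih
      rw [List.foldl_concat, hd]
      by_cases hc : PySem.Chars.isalpha c = true
      · have hl0 : PySem.Chars.islower (PySem.Chars.lowerChar c) = true :=
          pv_islower_lowerChar c hc
        rw [show pvStepA (PySem.Dict.mk ((pvKeyset cs).map (fun f => (String.ofList [f], pvNet cs f)))) c
            = (PySem.Dict.mk ((pvKeyset cs).map (fun f => (String.ofList [f], pvNet cs f)))).insert
                (String.ofList [PySem.Chars.lowerChar c])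
                ((PySem.Dict.mk ((pvKeyset cs).map (fun f => (String.ofList [f], pvNet cs f)))).getD
                    (String.ofList [PySem.Chars.lowerChar c]) 0
                  + (if PySem.Chars.islower c then (1 : Int) else -1)) from by
          unfold pvStepA; rw [if_pos hc]]
        rw [pv_keyset_append_alpha cs c hc]
        by_cases hmem : PySem.Chars.lowerChar c ∈ pvKeyset cs
        · have hcont := (pv_contains_map (pvKeyset cs) (pvNet cs) (PySem.Chars.lowerChar c)).mpr hmem
          rw [PySem.Dict.items_insert_of_contains _ _ hcont]
          rw [PySem.Dict.getD_eq_get?_getD,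
            pv_get?_map (pvKeyset cs) (pvNet cs) _ (pv_nodup_keyset cs) hmem]
          rw [show PySem.Set.add (pvKeyset cs) (PySem.Chars.lowerChar c) = pvKeyset cs from by
            rw [PySem.Set.add, if_pos ((PySem.Set.contains_iff _ _).mpr hmem)]]
          simp only [List.map_map]
          apply List.map_congr_left
          intro f hf
          have hflow := pv_mem_keyset_lower cs f hf
          by_cases hff : f = PySem.Chars.lowerChar c
          · have hb : (String.ofList [f] == String.ofList [PySem.Chars.lowerChar c]) = true :=
              (pv_mkS_beq _ _).mpr hff
            simp only [Function.comp_apply, hb, if_true, Option.getD_some]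
            rw [hff, pv_net_append_self cs c hc]
          · have hne := pv_ne_of_ne_lower c f hc hflow (fun e => hff e.symm)
            have hb : (String.ofList [f] == String.ofList [PySem.Chars.lowerChar c]) = false := by
              rw [Bool.eq_false_iff]
              intro hbeq
              exact hff ((pv_mkS_beq _ _).mp hbeq)
            simp only [Function.comp_apply, hb, Bool.false_eq_true, if_false]
            rw [pv_net_append_ne cs c f hne.1 hne.2]
        · have hcont : (PySem.Dict.mk ((pvKeyset cs).map
              (fun f => (String.ofList [f], pvNet cs f)))).contains
                (String.ofList [PySem.Chars.lowerChar c]) = false := by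
            rw [Bool.eq_false_iff]
            intro h
            exact hmem ((pv_contains_map (pvKeyset cs) (pvNet cs) _).mp h)
          rw [PySem.Dict.items_insert_of_not_contains _ _ hcont,
            PySem.Dict.getD_of_not_contains _ _ hcont]
          rw [show PySem.Set.add (pvKeyset cs) (PySem.Chars.lowerChar c)
              = pvKeyset cs ++ [PySem.Chars.lowerChar c] from by
            rw [PySem.Set.add, if_neg]
            rw [Bool.not_eq_true, Bool.eq_false_iff]
            intro h
            exact hmem ((PySem.Set.contains_iff _ _).mp h)]
          rw [List.map_append]
          congr 1
          · apply List.map_congr_left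
            intro f hf
            have hflow := pv_mem_keyset_lower cs f hf
            have hff : f ≠ PySem.Chars.lowerChar c := fun e => hmem (e ▸ hf)
            have hne := pv_ne_of_ne_lower c f hc hflow (fun e => hff e.symm)
            rw [pv_net_append_ne cs c f hne.1 hne.2]
          · rw [List.map_cons, List.map_nil]
            rw [pv_net_append_self cs c hc, pv_net_zero cs _ hl0 hmem]
      · rw [show pvStepA (PySem.Dict.mk ((pvKeyset cs).map (fun f => (String.ofList [f], pvNet cs f)))) c
            = PySem.Dict.mk ((pvKeyset cs).map (fun f => (String.ofList [f], pvNet cs f))) from by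
          unfold pvStepA; rw [if_neg hc]]
        rw [pv_keyset_append_nonalpha cs c hc]
        apply List.map_congr_left
        intro f hf
        have hflow := pv_mem_keyset_lower cs f hf
        have h1 : c ≠ f := fun e => hc (e ▸ pv_isalpha_of_lower f hflow)
        have h2 : c ≠ PySem.Chars.upperChar f := fun e =>
          hc (e ▸ pv_isalpha_of_upper _ (pv_isupper_upperChar f hflow))
        rw [pv_net_append_ne cs c f h1 h2]

-- ===== VERDICT (by name: the statement is the Claim_ definition above) =====
theorem parse_quark_content_spec : Claim_equal_parse_quark_content := by
  intro q _
  unfold Spec_parse_quark_content parse_quark_content parse_quark_content_alt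
  by_cases hg : (["(", "/", "+", "-", "x", "y"].any
      (fun ch => PySem.Str.isIn ch (PySem.Str.strip q))) = true
  · simp only [hg, if_true]
  · simp only [hg, if_false, Bool.false_eq_true]
    rw [show (fun (d : PySem.Dict String Int) ch =>
        if PySem.Chars.isalpha ch then
          d.insert (String.ofList [PySem.Chars.lowerChar ch])
            (d.getD (String.ofList [PySem.Chars.lowerChar ch]) 0
              + (if PySem.Chars.islower ch then (1 : Int) else -1))
        else d) = pvStepA from rfl]
    rw [pv_main]
    rw [show PySem.List.dedup
        (((PySem.Str.strip q).toList.filter (fun c => PySem.Chars.isalpha c)).map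
          PySem.Chars.lowerChar) = pvKeyset (PySem.Str.strip q).toList from rfl]
    refine congrArg some (List.map_congr_left fun f _ => ?_)
    rw [show PySem.Str.count (PySem.Str.strip q) (String.ofList [f])
        = PySem.Chars.count (PySem.Str.strip q).toList [f] from by
      rw [PySem.Str.count]; simp]
    rw [show PySem.Str.count (PySem.Str.strip q) (String.ofList [PySem.Chars.upperChar f])
        = PySem.Chars.count (PySem.Str.strip q).toList [PySem.Chars.upperChar f] from by
      rw [PySem.Str.count]; simp]
    rw [pv_count_singleton, pv_count_singleton]
    rfl
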